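-- pv_equiv track=rewrite | github.com/Mamlesh18/Data-Structures-Algorithm-Codes | Top Interview 150/Array/majority element.py | major
-- ===== SOURCE A (Python) =====
-- def major(nums):
--     if not nums:
--         return 0
--     dicts = {}
--     for i in range(0,len(nums)):
--         if nums[i] in dicts:
--             dicts[nums[i]] += 1
--         else:
--             dicts[nums[i]] = 1
--     sorte = sorted(dicts.items(),key = lambda item:item[1],reverse=True)
--     return sorte[0][0]
-- ===== SOURCE B (Python) =====
-- def major(nums):
--     if not nums:
--         return 0
--     seen = set()
--     best = 0
--     best_count = -1
--     for v in nums: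
--         if v in seen:
--             continue
--         seen.add(v)
--         c = nums.count(v)
--         if c > best_count:
--             best = v
--             best_count = c
--     return best
-- ===== Notes on version B (the rewrite author's own statement) =====
-- stated objective: simpler
-- what changed: replaces the count-dict plus stable reverse-sort with a single in-order scan over first-seen distinct values keeping a running argmax via nums.count, reproducing the first-seen tie-break with strict >
import Mathlib
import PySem

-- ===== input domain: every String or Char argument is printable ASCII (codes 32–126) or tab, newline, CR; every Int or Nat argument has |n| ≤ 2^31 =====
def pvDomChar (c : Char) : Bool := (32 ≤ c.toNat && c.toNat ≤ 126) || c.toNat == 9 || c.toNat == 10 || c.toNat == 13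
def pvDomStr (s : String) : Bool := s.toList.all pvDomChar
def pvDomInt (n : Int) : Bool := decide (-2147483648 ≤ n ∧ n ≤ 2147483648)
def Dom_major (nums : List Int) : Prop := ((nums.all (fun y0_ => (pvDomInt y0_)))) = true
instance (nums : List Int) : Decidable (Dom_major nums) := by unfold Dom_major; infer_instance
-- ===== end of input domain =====

-- B replaces A's count-dict + stable reverse-sort with one in-order scan over first-seen
-- distinct values keeping a running argmax (strict >), which reproduces A's first-seen tie-break.


-- ===== PORT A =====
def major (nums : List Int) : Int :=
  if nums = [] then 0
  else
    let dicts : PySem.Dict Int Int :=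
      (PySem.List.pyRange 0 (PySem.List.len nums) 1).foldl
        (fun d i =>
          let x := PySem.List.pyGetD nums i 0
          if d.contains x then d.insert x (d.getD x 0 + 1) else d.insert x 1)
        PySem.Dict.empty
    let sorte := PySem.List.sorted dicts.items (fun p => p.2) true
    (PySem.List.pyGetD sorte 0 (0, 0)).1

-- ===== PORT B =====
def major_alt (nums : List Int) : Int :=
  if nums = [] then 0
  else
    (nums.foldl
      (fun (st : PySem.Set Int × Int × Int) v =>
        if PySem.Set.contains st.1 v then st
        else
          let c : Int := (nums.count v : Int)
          if c > st.2.2 then (PySem.Set.add st.1 v, v, c)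
          else (PySem.Set.add st.1 v, st.2.1, st.2.2))
      (PySem.Set.empty, 0, -1)).2.1

-- ===== PRECONDITION & SPEC =====
def Spec_major (nums : List Int) (out : Int) : Prop := out = major_alt nums
instance (nums : List Int) (out : Int) : Decidable (Spec_major nums out) := by unfold Spec_major; infer_instance

-- ===== CLAIM (what is proved, stated in full; the proofs are below) =====
def Claim_equal_major : Prop := ∀ (nums : List Int), Dom_major nums → Spec_major nums (major nums)

-- ===== LEMMAS AND PROOFS =====

-- head of an insertion-sort fold starting from a nonempty accumulator: the head is the
-- running strict argmax of the inserted elements against the current head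
lemma foldl_insertBy_head {α : Type} (before : α → α → Bool) :
    ∀ (l : List α) (a : α) (t : List α), ∃ t',
      l.foldl (fun acc x => PySem.List.insertBy before x acc) (a :: t)
        = (l.foldl (fun m x => if before x m then x else m) a) :: t' := by
  intro l
  induction l with
  | nil => intro a t; exact ⟨t, rfl⟩
  | cons x l ih =>
    intro a t
    by_cases h : before x a
    · simpa [PySem.List.insertBy, h] using ih x (a :: t)
    · simpa [PySem.List.insertBy, h] using ih a (PySem.List.insertBy before x t)

-- B's loop with a seen-set equals the plain argmax fold over the not-yet-seen first occurrences
lemma loopB (c : Int → Int) :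
    ∀ (l : List Int) (seen : PySem.Set Int) (b bc : Int),
      (l.foldl
        (fun (st : PySem.Set Int × Int × Int) v =>
          if PySem.Set.contains st.1 v then st
          else
            if c v > st.2.2 then (PySem.Set.add st.1 v, v, c v)
            else (PySem.Set.add st.1 v, st.2.1, st.2.2))
        (seen, b, bc)).2
      = (((PySem.Set.ofList l).filter (fun y => !(PySem.Set.contains seen y))).foldl
          (fun (p : Int × Int) v => if c v > p.2 then (v, c v) else p) (b, bc)) := by
  intro l
  induction l with
  | nil => intro seen b bc; rfl
  | cons x l ih =>
    intro seen b bc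
    rw [PySem.Set.ofList_cons]
    by_cases hx : PySem.Set.contains seen x
    · have hxm : x ∈ seen := (PySem.Set.contains_iff seen x).1 hx
      have hfilt : List.filter (fun y => (!decide (y ∈ seen) && !(y == x)))
            (PySem.Set.ofList l)
          = List.filter (fun y => !decide (y ∈ seen)) (PySem.Set.ofList l) := by
        apply List.filter_congr
        intro y _
        by_cases hyx : y = x
        · subst hyx; simp [hxm]
        · simp [hyx]
      simpa [hx, hxm, PySem.Set.discard, List.filter_filter, hfilt] using ih seen b bc
    · have hxm : x ∉ seen := fun h => hx ((PySem.Set.contains_iff seen x).2 h)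
      have hadd : PySem.Set.add seen x = seen ++ [x] := by
        simp [PySem.Set.add, hxm]
      by_cases hc : c x > bc
      · simpa [hx, hxm, hc, hadd, PySem.Set.discard, List.filter_filter]
          using ih (PySem.Set.add seen x) x (c x)
      · simpa [hx, hxm, hc, hadd, PySem.Set.discard, List.filter_filter]
          using ih (PySem.Set.add seen x) b bc

lemma major_eq_alt (nums : List Int) : major nums = major_alt nums := by
  by_cases hnil : nums = []
  · simp [major, major_alt, hnil]
  · -- the dict A builds is Counter(nums)
    have hdict :
        (PySem.List.pyRange 0 (PySem.List.len nums) 1).foldl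
          (fun (d : PySem.Dict Int Int) i =>
            let x := PySem.List.pyGetD nums i 0
            if d.contains x then d.insert x (d.getD x 0 + 1) else d.insert x 1)
          PySem.Dict.empty = PySem.Dict.counter nums := by
      rw [PySem.List.foldl_pyRange_zero_pyGetD nums 0
            (fun (d : PySem.Dict Int Int) x =>
              if d.contains x then d.insert x (d.getD x 0 + 1) else d.insert x 1)
            PySem.Dict.empty]
      rw [← PySem.Dict.foldl_insert_getD_add_one_eq_counter nums]
      congr 1
      funext d x
      by_cases h : d.contains x
      · simp [h]
      · simp [h, PySem.Dict.getD_of_not_contains d 0 (by simpa using h)]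
    obtain ⟨k0, rest, hof⟩ : ∃ k0 rest, PySem.Set.ofList nums = k0 :: rest := by
      cases h : PySem.Set.ofList nums with
      | nil =>
        obtain ⟨y, ys, rfl⟩ := List.exists_cons_of_ne_nil hnil
        have : y ∈ PySem.Set.ofList (y :: ys) := by
          rw [PySem.Set.mem_ofList]; exact List.mem_cons_self
        rw [h] at this; cases this
      | cons a b => exact ⟨a, b, rfl⟩
    -- A's side: head of the stable reverse sort of Counter's items
    have hA : major nums =
        ((rest.foldl
          (fun (m : Int × Int) k =>
            if m.2 < ((nums.count k : Int)) then (k, (nums.count k : Int)) else m)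
          (k0, (nums.count k0 : Int))).1) := by
      show (if nums = [] then (0:Int) else _) = _
      rw [if_neg hnil]
      simp only [hdict]
      rw [PySem.Dict.items_counter nums, hof]
      rw [PySem.List.sorted_rev_eq_foldl_insertBy]
      simp only [List.map_cons, List.foldl_cons, PySem.List.insertBy]
      obtain ⟨t', ht'⟩ := foldl_insertBy_head
        (fun (a b : Int × Int) => decide (b.2 < a.2))
        (rest.map (fun k => (k, (nums.count k : Int)))) (k0, (nums.count k0 : Int)) []
      rw [ht']
      simp [PySem.List.pyGetD, List.foldl_map]
    -- B's side
    have hB : major_alt nums =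
        ((rest.foldl
          (fun (m : Int × Int) k =>
            if m.2 < ((nums.count k : Int)) then (k, (nums.count k : Int)) else m)
          (k0, (nums.count k0 : Int))).1) := by
      show (if nums = [] then (0:Int) else _) = _
      rw [if_neg hnil]
      have hloop := loopB (fun v => (nums.count v : Int)) nums PySem.Set.empty 0 (-1)
      rw [hloop]
      have hfe : (PySem.Set.ofList nums).filter
          (fun y => !(PySem.Set.contains PySem.Set.empty y)) = PySem.Set.ofList nums := by
        simp [PySem.Set.contains, PySem.Set.empty]
      rw [hfe, hof]
      have h0 : (-1 : Int) < ((nums.count k0 : Int)) :=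
        lt_of_lt_of_le (by norm_num) (Int.natCast_nonneg _)
      simp only [List.foldl_cons, gt_iff_lt]
      rw [if_pos h0]
    rw [hA, hB]

-- ===== VERDICT (by name: the statement is the Claim_ definition above) =====
theorem major_spec : Claim_equal_major := by
  intro nums _
  unfold Spec_major
  exact major_eq_alt nums
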